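-- pv_equiv track=rewrite | github.com/danlionis/advent-of-code | 2022/17.py | get_rock_parts
-- ===== SOURCE A (Python) =====
-- def get_rock_parts(x, y, shape):
--     match shape:
--         case "-": return set([(x + dx, y) for dx in range(4)])
--         case "+": return set([(x + 1, y), (x, y + 1), (x + 1, y + 1), (x + 2, y + 1), (x + 1, y + 2)])
--         case "L": return set([(x + dx, y) for dx in range(3)] + [(x + 2, y + dy) for dy in range(1, 3)])
--         case "I": return set([(x, y + dy) for dy in range(4)])
--         case "S": return set([(x, y), (x + 1, y), (x, y + 1), (x + 1, y + 1)])
--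
--     return set()
-- ===== SOURCE B (Python) =====
-- # Each shape is a 16-bit bitmap of a 4x4 grid: bit (4*dy + dx) set means the
-- # rock occupies the cell at relative offset (dx, dy).
-- MASKS = {"-": 0x000F, "+": 0x0272, "L": 0x0447, "I": 0x1111, "S": 0x0033}
--
--
-- def cells(m):
--     return [(dx, dy) for dy in range(4) for dx in range(4) if (m >> (4 * dy + dx)) & 1]
--
--
-- def get_rock_parts(x, y, shape):
--     return {(x + dx, y + dy) for dx, dy in cells(MASKS.get(shape, 0))}
-- ===== Notes on version B (the rewrite author's own statement) =====
-- stated objective: alternative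
-- what changed: Replaced the five-way match/case of hard-coded coordinate lists by a 16-bit bitmap per shape (one bit per cell of a 4x4 grid), decoded by a uniform row-major bit scan and translated by (x, y); unknown shapes get mask 0 and decode to the empty set.
import Mathlib
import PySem

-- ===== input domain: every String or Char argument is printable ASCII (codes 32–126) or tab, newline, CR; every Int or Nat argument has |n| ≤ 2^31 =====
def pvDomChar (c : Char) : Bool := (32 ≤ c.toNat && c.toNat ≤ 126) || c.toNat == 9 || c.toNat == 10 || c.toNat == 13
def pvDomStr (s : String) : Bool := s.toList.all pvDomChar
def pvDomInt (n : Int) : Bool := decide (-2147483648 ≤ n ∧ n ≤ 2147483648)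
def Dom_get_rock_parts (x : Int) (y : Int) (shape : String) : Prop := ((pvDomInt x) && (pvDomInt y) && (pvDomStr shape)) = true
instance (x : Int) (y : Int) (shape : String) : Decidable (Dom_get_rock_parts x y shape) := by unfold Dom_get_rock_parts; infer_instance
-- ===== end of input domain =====

-- B replaces the five-way match/case of coordinate literals by a 16-bit bitmap per
-- shape (one bit per cell of a 4x4 grid), decoded by a row-major scan and then
-- translated by (x, y) (objective: alternative).

-- ===== PORT A =====
def get_rock_parts (x : Int) (y : Int) (shape : String) : List (Int × Int) :=
  if shape = "-" then
    PySem.Set.ofList ((PySem.List.pyRange 0 4 1).map (fun dx => (x + dx, y)))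
  else if shape = "+" then
    PySem.Set.ofList [(x + 1, y), (x, y + 1), (x + 1, y + 1), (x + 2, y + 1), (x + 1, y + 2)]
  else if shape = "L" then
    PySem.Set.ofList ((PySem.List.pyRange 0 3 1).map (fun dx => (x + dx, y)) ++
                      (PySem.List.pyRange 1 3 1).map (fun dy => (x + 2, y + dy)))
  else if shape = "I" then
    PySem.Set.ofList ((PySem.List.pyRange 0 4 1).map (fun dy => (x, y + dy)))
  else if shape = "S" then
    PySem.Set.ofList [(x, y), (x + 1, y), (x, y + 1), (x + 1, y + 1)]
  else
    PySem.Set.empty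

-- ===== PORT B =====
def pvMASKS : PySem.Dict String Int :=
  PySem.Dict.ofList [("-", 0x000F), ("+", 0x0272), ("L", 0x0447), ("I", 0x1111), ("S", 0x0033)]

-- cells(m): decode the bitmap row-major; `(m >> k) & 1` is `Int.land (Int.shiftRight m k) 1`
-- (the shift amount 4*dy+dx is always ≥ 0, so `.toNat` is exact here)
def pvCells (m : Int) : List (Int × Int) :=
  (PySem.List.pyRange 0 4 1).flatMap (fun dy =>
    ((PySem.List.pyRange 0 4 1).filter
        (fun dx => Int.land (Int.shiftRight m (4 * dy + dx).toNat) 1 != 0)).map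
      (fun dx => (dx, dy)))

def get_rock_parts_alt (x : Int) (y : Int) (shape : String) : List (Int × Int) :=
  PySem.Set.ofList ((pvCells (pvMASKS.getD shape 0)).map (fun d => (x + d.1, y + d.2)))

-- ===== PRECONDITION & SPEC =====
def Spec_get_rock_parts (x : Int) (y : Int) (shape : String) (out : List (Int × Int)) : Prop := out = get_rock_parts_alt x y shape
instance (x : Int) (y : Int) (shape : String) (out : List (Int × Int)) : Decidable (Spec_get_rock_parts x y shape out) := by unfold Spec_get_rock_parts; infer_instance

-- ===== CLAIM (what is proved, stated in full; the proofs are below) =====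
def Claim_equal_get_rock_parts : Prop := ∀ (x : Int) (y : Int) (shape : String), Dom_get_rock_parts x y shape → Spec_get_rock_parts x y shape (get_rock_parts x y shape)

-- ===== LEMMAS AND PROOFS =====
lemma pvCells_dash : pvCells (pvMASKS.getD "-" 0) = [(0, 0), (1, 0), (2, 0), (3, 0)] := by decide
lemma pvCells_plus : pvCells (pvMASKS.getD "+" 0) = [(1, 0), (0, 1), (1, 1), (2, 1), (1, 2)] := by decide
lemma pvCells_L : pvCells (pvMASKS.getD "L" 0) = [(0, 0), (1, 0), (2, 0), (2, 1), (2, 2)] := by decide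
lemma pvCells_I : pvCells (pvMASKS.getD "I" 0) = [(0, 0), (0, 1), (0, 2), (0, 3)] := by decide
lemma pvCells_S : pvCells (pvMASKS.getD "S" 0) = [(0, 0), (1, 0), (0, 1), (1, 1)] := by decide
lemma pvCells_zero : pvCells 0 = [] := by decide
lemma pvMASKS_eq : pvMASKS = PySem.Dict.mk
    [("-", 15), ("+", 626), ("L", 1095), ("I", 4369), ("S", 51)] := by decide

lemma pvMASKS_getD_other (shape : String) (h1 : shape ≠ "-") (h2 : shape ≠ "+")
    (h3 : shape ≠ "L") (h4 : shape ≠ "I") (h5 : shape ≠ "S") :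
    pvMASKS.getD shape 0 = 0 := by
  rw [pvMASKS_eq]
  simp [PySem.Dict.getD, PySem.Dict.get?, Ne.symm h1, Ne.symm h2, Ne.symm h3, Ne.symm h4,
    Ne.symm h5]

-- ===== VERDICT (by name: the statement is the Claim_ definition above) =====
theorem get_rock_parts_spec : Claim_equal_get_rock_parts := by
  intro x y shape _
  unfold Spec_get_rock_parts get_rock_parts get_rock_parts_alt
  by_cases h1 : shape = "-"
  · subst h1
    rw [pvCells_dash]
    simp [PySem.List.pyRange, List.range_succ, PySem.Set.ofList, PySem.Set.add, PySem.Set.empty]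
  by_cases h2 : shape = "+"
  · subst h2
    rw [pvCells_plus]
    simp [h1, PySem.Set.ofList, PySem.Set.add, PySem.Set.empty]
  by_cases h3 : shape = "L"
  · subst h3
    rw [pvCells_L]
    simp [h1, h2, PySem.List.pyRange, List.range_succ, PySem.Set.ofList, PySem.Set.add,
      PySem.Set.empty]
  by_cases h4 : shape = "I"
  · subst h4
    rw [pvCells_I]
    simp [h1, h2, h3, PySem.List.pyRange, List.range_succ, PySem.Set.ofList, PySem.Set.add,
      PySem.Set.empty]
  by_cases h5 : shape = "S"
  · subst h5
    rw [pvCells_S]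
    simp [h1, h2, h3, h4, PySem.Set.ofList, PySem.Set.add, PySem.Set.empty]
  · rw [pvMASKS_getD_other shape h1 h2 h3 h4 h5, pvCells_zero]
    simp [h1, h2, h3, h4, h5, PySem.Set.ofList, PySem.Set.empty]
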